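-- pv_equiv track=rewrite | github.com/DHRUV6029/Google-Msft_InterviewQues | Google/non_decresong_subarray_in_O(1).py | solve_followup
-- ===== SOURCE A (Python) =====
-- def solve_followup(nums):
--    l = 0
--    ans = 0
--    changes = 0
--
--    for r in range(1, len(nums)):
--        if nums[r] < nums[r-1]:
--            changes += 1
--
--        while l <= r and changes > 1:
--            if nums[l] > nums[l+1]:
--                changes -= 1
--            l += 1
--
--        ans = max(ans, r-l+1)
--
--    return ans
-- ===== SOURCE B (Python) =====
-- def solve_followup(nums):
--     ans = 0
--     cur0 = 1  # longest non-decreasing run ending at current index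
--     cur1 = 1  # longest run ending here with at most one decrease
--     for r in range(1, len(nums)):
--         if nums[r] >= nums[r - 1]:
--             cur0 += 1
--             cur1 += 1
--         else:
--             cur1 = cur0 + 1
--             cur0 = 1
--         if cur1 > ans:
--             ans = cur1
--     return ans
-- ===== Notes on version B (the rewrite author's own statement) =====
-- stated objective: simpler
-- what changed: Replaced A's two-pointer sliding window with its inner while-loop by a single forward DP scan that keeps two run-length counters (longest non-decreasing run ending here, longest run ending here with at most one decrease), so the nested loop disappears.
import Mathlib
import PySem

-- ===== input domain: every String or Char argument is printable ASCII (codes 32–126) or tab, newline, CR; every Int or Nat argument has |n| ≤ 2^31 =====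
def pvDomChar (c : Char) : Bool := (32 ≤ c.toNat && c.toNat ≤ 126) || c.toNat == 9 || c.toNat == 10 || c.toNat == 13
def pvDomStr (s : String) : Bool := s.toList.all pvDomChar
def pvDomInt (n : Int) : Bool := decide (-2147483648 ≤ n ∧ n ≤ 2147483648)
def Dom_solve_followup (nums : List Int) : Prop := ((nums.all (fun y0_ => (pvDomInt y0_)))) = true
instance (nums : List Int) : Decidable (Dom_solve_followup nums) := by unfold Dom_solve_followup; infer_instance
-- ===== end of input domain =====

-- B replaces A's two-pointer window (with inner while-loop) by a single DP scan
-- keeping two run-length counters; same linear task, simpler decomposition.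


-- ===== PORT A =====
-- nums[i] for the Nat indices both programs use (always in range when reached)
def pvG (nums : List Int) (i : Nat) : Int := (PySem.List.pyGet? nums (Int.ofNat i)).getD 0

-- the inner `while l <= r and changes > 1` loop of A
def pvWhileA (nums : List Int) (r l : Nat) (changes : Int) : Nat × Int :=
  if l ≤ r ∧ changes > 1 then
    pvWhileA nums r (l + 1)
      (if pvG nums l > pvG nums (l + 1) then changes - 1 else changes)
  else (l, changes)
termination_by r + 1 - l
decreasing_by omega

-- one iteration of A's for-loop: state (l, ans, changes), index r
def pvStepA (nums : List Int) (st : Nat × Int × Int) (r : Nat) : Nat × Int × Int :=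
  let (l, ans, changes) := st
  let changes := if pvG nums r < pvG nums (r - 1) then changes + 1 else changes
  let (l, changes) := pvWhileA nums r l changes
  (l, max ans ((r : Int) - (l : Int) + 1), changes)

def solve_followup (nums : List Int) : Int :=
  ((List.range' 1 (nums.length - 1)).foldl (pvStepA nums) (0, 0, 0)).2.1

-- ===== PORT B =====
-- one iteration of B's loop: state (ans, cur0, cur1), index r
def pvStepB (nums : List Int) (st : Int × Int × Int) (r : Nat) : Int × Int × Int :=
  let (ans, cur0, cur1) := st
  let (cur0, cur1) :=
    if pvG nums r ≥ pvG nums (r - 1) then (cur0 + 1, cur1 + 1)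
    else ((1 : Int), cur0 + 1)
  (if cur1 > ans then cur1 else ans, cur0, cur1)

def solve_followup_alt (nums : List Int) : Int :=
  ((List.range' 1 (nums.length - 1)).foldl (pvStepB nums) (0, 1, 1)).1

-- ===== PRECONDITION & SPEC =====
def Spec_solve_followup (nums : List Int) (out : Int) : Prop := out = solve_followup_alt nums
instance (nums : List Int) (out : Int) : Decidable (Spec_solve_followup nums out) := by unfold Spec_solve_followup; infer_instance

-- ===== CLAIM (what is proved, stated in full; the proofs are below) =====
def Claim_equal_solve_followup : Prop := ∀ (nums : List Int), Dom_solve_followup nums → Spec_solve_followup nums (solve_followup nums)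

-- ===== LEMMAS AND PROOFS =====

-- "there is a decrease at index i" (i ≥ 1)
def pvDec (nums : List Int) (i : Nat) : Prop := pvG nums i < pvG nums (i - 1)

-- invariant relating the two loop states after processing indices 1..k
def pvInv (nums : List Int) (k : Nat) (a : Nat × Int × Int) (b : Int × Int × Int) : Prop :=
  a.2.1 = b.1 ∧ a.1 ≤ k ∧ b.2.2 = (k : Int) - (a.1 : Int) + 1 ∧
  ((a.2.2 = 0 ∧ a.1 = 0 ∧ b.2.1 = b.2.2 ∧
      (∀ i, 1 ≤ i → i ≤ k → ¬ pvDec nums i)) ∨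
   (a.2.2 = 1 ∧ ∃ p, a.1 + 1 ≤ p ∧ p ≤ k ∧ pvDec nums p ∧
      (∀ i, a.1 + 1 ≤ i → i ≤ k → i ≠ p → ¬ pvDec nums i) ∧
      b.2.1 = (k : Int) - (p : Int) + 1))

theorem pvWhileA_noop (nums : List Int) (r l : Nat) (changes : Int)
    (h : changes ≤ 1) : pvWhileA nums r l changes = (l, changes) := by
  unfold pvWhileA
  exact if_neg (by omega)

theorem pvWhileA_shrink (nums : List Int) (r p : Nat) (hpr : p ≤ r)
    (hp : pvDec nums p) :
    ∀ l, l + 1 ≤ p → (∀ i, l + 1 ≤ i → i < p → ¬ pvDec nums i) →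
      pvWhileA nums r l 2 = (p, 1) := by
  suffices H : ∀ d l, p = l + d + 1 →
      (∀ i, l + 1 ≤ i → i < p → ¬ pvDec nums i) → pvWhileA nums r l 2 = (p, 1) by
    intro l hlp hno
    exact H (p - l - 1) l (by omega) hno
  intro d
  induction d with
  | zero =>
    intro l hlp hno
    unfold pvWhileA
    rw [if_pos (by omega)]
    have hdec : pvG nums l > pvG nums (l + 1) := by
      have h2 := hp; unfold pvDec at h2; rw [hlp] at h2
      simp only [Nat.add_sub_cancel] at h2
      simpa using h2
    rw [if_pos hdec, show l + 1 = p by omega, pvWhileA_noop _ _ _ _ (by norm_num)]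
    norm_num
  | succ d ih =>
    intro l hlp hno
    unfold pvWhileA
    rw [if_pos (by omega)]
    have hnd : ¬ pvG nums l > pvG nums (l + 1) := by
      have h2 := hno (l + 1) (by omega) (by omega)
      unfold pvDec at h2; simp only [Nat.add_sub_cancel] at h2; omega
    rw [if_neg hnd]
    exact ih (l + 1) (by omega) (fun i h1 h2 => hno i (by omega) h2)

theorem pvInv_step (nums : List Int) (k : Nat) (a : Nat × Int × Int)
    (b : Int × Int × Int) (h : pvInv nums k a b) :
    pvInv nums (k + 1) (pvStepA nums a (k + 1)) (pvStepB nums b (k + 1)) := by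
  obtain ⟨l, ans, changes⟩ := a
  obtain ⟨ansB, cur0, cur1⟩ := b
  obtain ⟨hans, hlk, hcur1, hcase⟩ := h
  try dsimp only at hans hlk hcur1 hcase
  by_cases hdec : pvDec nums (k + 1)
  · -- a decrease at k+1
    have hAcond : pvG nums (k + 1) < pvG nums (k + 1 - 1) := hdec
    have hBcond : ¬ pvG nums (k + 1) ≥ pvG nums (k + 1 - 1) := by
      unfold pvDec at hdec; omega
    rcases hcase with ⟨hc0, hl0, hc01, hno⟩ | ⟨hc1, p, hp1, hp2, hpdec, hno, hcur0⟩
    · -- changes was 0: becomes 1, no shrink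
      unfold pvStepA pvStepB
      simp only [if_pos hAcond, if_neg hBcond, hc0, hl0]
      rw [pvWhileA_noop _ _ _ _ (by norm_num)]
      refine ⟨?_, by try dsimp only; omega, ?_, Or.inr ⟨rfl, k + 1, by try dsimp only; omega,
        le_refl _, hdec, ?_, ?_⟩⟩
      · try dsimp only
        simp only [hans, hc01, hcur1, hl0, max_def]; push_cast; split_ifs <;> omega
      · try dsimp only
        simp only [hc01, hcur1, hl0]; push_cast; ring
      · intro i h1 h2 h3; try dsimp only at h1; exact hno i h1 (by omega)
      · try dsimp only; push_cast; ring
    · -- changes was 1: becomes 2, window shrinks to start at p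
      try dsimp only at hp1 hno hcur0
      unfold pvStepA pvStepB
      simp only [if_pos hAcond, if_neg hBcond, hc1]
      have e2 : (1 : Int) + 1 = 2 := by norm_num
      rw [e2, pvWhileA_shrink nums (k + 1) p (by omega) hpdec l hp1
            (fun i h1 h2 => hno i h1 (by omega) (by omega))]
      refine ⟨?_, by try dsimp only; omega, ?_, Or.inr ⟨rfl, k + 1, by try dsimp only; omega,
        le_refl _, hdec, ?_, ?_⟩⟩
      · try dsimp only
        simp only [hans, hcur0, max_def]; push_cast; split_ifs <;> omega
      · try dsimp only
        simp only [hcur0]; push_cast; ring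
      · intro i h1 h2 h3; try dsimp only at h1
        exact hno i (by omega) (by omega) (by omega)
      · try dsimp only; push_cast; ring
  · -- no decrease at k+1
    have hAcond : ¬ pvG nums (k + 1) < pvG nums (k + 1 - 1) := hdec
    have hBcond : pvG nums (k + 1) ≥ pvG nums (k + 1 - 1) := by
      unfold pvDec at hdec; omega
    have hch : changes ≤ 1 := by rcases hcase with ⟨h, _⟩ | ⟨h, _⟩ <;> omega
    unfold pvStepA pvStepB
    simp only [if_neg hAcond, if_pos hBcond]
    rw [pvWhileA_noop _ _ _ _ hch]
    refine ⟨?_, by try dsimp only; omega, by try dsimp only; push_cast; omega, ?_⟩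
    · try dsimp only
      simp only [hans, hcur1, max_def]; push_cast; split_ifs <;> omega
    · rcases hcase with ⟨hc0, hl0, hc01, hno⟩ | ⟨hc1, p, hp1, hp2, hpdec, hno, hcur0⟩
      · refine Or.inl ⟨hc0, hl0, by try dsimp only at hc01 ⊢; omega, ?_⟩
        intro i h1 h2; try dsimp only at h1
        rcases Nat.lt_or_ge i (k + 1) with h | h
        · exact hno i h1 (by omega)
        · have : i = k + 1 := by omega
          subst this; exact hdec
      · try dsimp only at hp1 hno hcur0
        refine Or.inr ⟨hc1, p, by try dsimp only; omega, by omega, hpdec, ?_, ?_⟩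
        · intro i h1 h2 h3; try dsimp only at h1
          rcases Nat.lt_or_ge i (k + 1) with h | h
          · exact hno i h1 (by omega) h3
          · have : i = k + 1 := by omega
            subst this; exact hdec
        · try dsimp only; push_cast at hcur0 ⊢; omega

theorem pvInv_fold (nums : List Int) (k : Nat) :
    pvInv nums k ((List.range' 1 k).foldl (pvStepA nums) (0, 0, 0))
      ((List.range' 1 k).foldl (pvStepB nums) (0, 1, 1)) := by
  induction k with
  | zero =>
    refine ⟨rfl, le_refl _, by norm_num, Or.inl ⟨rfl, rfl, rfl, ?_⟩⟩
    intro i h1 h2; omega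
  | succ k ih =>
    rw [List.range'_1_concat, List.foldl_append, List.foldl_append]
    simp only [List.foldl_cons, List.foldl_nil]
    rw [Nat.add_comm 1 k]
    exact pvInv_step nums k _ _ ih

-- ===== VERDICT (by name: the statement is the Claim_ definition above) =====
theorem solve_followup_spec : Claim_equal_solve_followup := by
  intro nums _
  unfold Spec_solve_followup solve_followup solve_followup_alt
  exact (pvInv_fold nums (nums.length - 1)).1
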